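-- pv_equiv track=rewrite | github.com/srd-17/sos | sos/vmcore_report/emitters/sys/cpu_masks.py | _ranges_to_str
-- ===== SOURCE A (Python) =====
-- from typing import Iterable, List
--
-- def _ranges_to_str(vals: Iterable[int]) -> str:
--     """Convert a sorted iterable of ints to Linux-style CPU list string."""
--     arr = sorted(set(int(v) for v in vals))
--     if not arr:
--         return ""
--     ranges: List[str] = []
--     start = prev = arr[0]
--     for cur in arr[1:]:
--         if cur == prev + 1:
--             prev = cur
--             continue
--         # flush previous range
--         if start == prev:
--             ranges.append(f"{start}")
--         else:
--             ranges.append(f"{start}-{prev}")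
--         start = prev = cur
--     # flush last range
--     if start == prev:
--         ranges.append(f"{start}")
--     else:
--         ranges.append(f"{start}-{prev}")
--     return ",".join(ranges)
-- ===== SOURCE B (Python) =====
-- from typing import Iterable
--
--
-- def _ranges_to_str(vals: Iterable[int]) -> str:
--     """Convert ints to a Linux-style CPU list string (boundary detection by shifted zips)."""
--     arr = sorted(set(int(v) for v in vals))
--     # run starts: elements not preceded by their predecessor value
--     starts = [x for x, p in zip(arr, [None] + arr) if p is None or x != p + 1]
--     # run ends: elements not followed by their successor value
--     ends = [x for x, nxt in zip(arr, arr[1:] + [None]) if nxt is None or nxt != x + 1]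
--     return ",".join(f"{s}" if s == e else f"{s}-{e}" for s, e in zip(starts, ends))
-- ===== Notes on version B (the rewrite author's own statement) =====
-- stated objective: alternative
-- what changed: Replaces A's single stateful loop with start/prev scalars and inline range flushes by boundary detection: run starts and run ends are selected by zipping the sorted deduplicated list with shifted copies of itself, then zipped together and formatted.
import Mathlib
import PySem

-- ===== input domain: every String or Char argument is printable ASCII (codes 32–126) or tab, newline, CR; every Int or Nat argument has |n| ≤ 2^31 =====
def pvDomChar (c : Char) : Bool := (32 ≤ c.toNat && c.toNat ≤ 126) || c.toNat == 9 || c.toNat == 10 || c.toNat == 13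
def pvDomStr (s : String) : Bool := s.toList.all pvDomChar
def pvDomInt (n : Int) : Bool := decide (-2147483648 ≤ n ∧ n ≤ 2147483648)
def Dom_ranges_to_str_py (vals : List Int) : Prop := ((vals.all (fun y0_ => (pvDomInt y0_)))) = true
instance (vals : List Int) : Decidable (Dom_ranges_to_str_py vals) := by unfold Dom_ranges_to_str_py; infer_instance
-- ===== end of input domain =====

-- B replaces A's start/prev accumulator loop by boundary detection: run starts/ends are found by zipping the sorted list with shifted copies of itself, then zipped together; same cost, different decomposition.

-- ===== PORT A =====
-- flush of the current range: f"{start}" or f"{start}-{prev}"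
def rtsAFlush (start prev : Int) : String :=
  if start = prev then PySem.Int.toStr start
  else PySem.Int.toStr start ++ "-" ++ PySem.Int.toStr prev

-- the 'for cur in arr[1:]' loop over state (start, prev, ranges), with the final flush
def rtsALoop : List Int → Int → Int → List String → List String
  | [], start, prev, ranges => ranges ++ [rtsAFlush start prev]
  | cur :: rest, start, prev, ranges =>
      if cur = prev + 1 then rtsALoop rest start cur ranges
      else rtsALoop rest cur cur (ranges ++ [rtsAFlush start prev])

def ranges_to_str_py (vals : List Int) : String :=
  let arr := PySem.List.sorted (PySem.Set.ofList vals) (fun x => x) false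
  match arr with
  | [] => ""
  | a :: rest => PySem.Str.join "," (rtsALoop rest a a [])

-- ===== PORT B =====
-- the guard 'p is None or x != p + 1'
def rtsStartKeep (xp : Int × Option Int) : Bool :=
  match xp.2 with | none => true | some p => xp.1 != p + 1

-- [x for x, p in zip(arr, [None] + arr) if p is None or x != p + 1]
def rtsStarts (arr : List Int) : List Int :=
  ((arr.zip ([none] ++ arr.map some)).filter rtsStartKeep).map Prod.fst

-- the guard 'nxt is None or nxt != x + 1'
def rtsEndKeep (xn : Int × Option Int) : Bool :=
  match xn.2 with | none => true | some nxt => nxt != xn.1 + 1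

-- [x for x, nxt in zip(arr, arr[1:] + [None]) if nxt is None or nxt != x + 1]
def rtsEnds (arr : List Int) : List Int :=
  ((arr.zip ((arr.drop 1).map some ++ [none])).filter rtsEndKeep).map Prod.fst

-- the comprehension body: f"{s}" if s == e else f"{s}-{e}"
def rtsFmt (p : Int × Int) : String :=
  if p.1 = p.2 then PySem.Int.toStr p.1
  else PySem.Int.toStr p.1 ++ "-" ++ PySem.Int.toStr p.2

def ranges_to_str_py_alt (vals : List Int) : String :=
  let arr := PySem.List.sorted (PySem.Set.ofList vals) (fun x => x) false
  PySem.Str.join "," (((rtsStarts arr).zip (rtsEnds arr)).map rtsFmt)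

-- ===== PRECONDITION & SPEC =====
def Spec_ranges_to_str_py (vals : List Int) (out : String) : Prop := out = ranges_to_str_py_alt vals
instance (vals : List Int) (out : String) : Decidable (Spec_ranges_to_str_py vals out) := by unfold Spec_ranges_to_str_py; infer_instance

-- ===== CLAIM (what is proved, stated in full; the proofs are below) =====
def Claim_equal_ranges_to_str_py : Prop := ∀ (vals : List Int), Dom_ranges_to_str_py vals → Spec_ranges_to_str_py vals (ranges_to_str_py vals)

-- ===== LEMMAS AND PROOFS =====

-- recursive characterisation of rtsStarts: keep x when the previous element is not x - 1
def rtsS : Option Int → List Int → List Int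
  | _, [] => []
  | p, x :: xs =>
      if (match p with | none => true | some q => x != q + 1) then x :: rtsS (some x) xs
      else rtsS (some x) xs

-- recursive characterisation of rtsEnds: keep x when the next element is not x + 1
def rtsE : Int → List Int → List Int
  | x, [] => [x]
  | x, y :: ys => if y != x + 1 then x :: rtsE y ys else rtsE y ys

theorem rtsStarts_zip (xs : List Int) : ∀ (po : Option Int),
    ((xs.zip (po :: xs.map some)).filter rtsStartKeep).map Prod.fst
      = rtsS po xs := by
  induction xs with
  | nil => intro po; rfl
  | cons x xs ih =>
      intro po
      simp only [List.map_cons, List.zip_cons_cons, List.filter_cons, rtsS, rtsStartKeep]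
      split <;> (try split) <;> simp [ih]

theorem rtsEnds_zip (xs : List Int) : ∀ (x : Int),
    (((x :: xs).zip (xs.map some ++ [none])).filter rtsEndKeep).map Prod.fst
      = rtsE x xs := by
  induction xs with
  | nil => intro x; rfl
  | cons y ys ih =>
      intro x
      simp only [List.map_cons, List.cons_append, List.zip_cons_cons, List.filter_cons, rtsE, rtsEndKeep]
      split <;> simp [ih]

-- A's loop computes exactly the formatted (start, end) pairs, appended to the accumulator.
theorem rtsALoop_eq (xs : List Int) : ∀ (start prev : Int) (ranges : List String),
    rtsALoop xs start prev ranges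
      = ranges ++ ((start :: rtsS (some prev) xs).zip (rtsE prev xs)).map rtsFmt := by
  induction xs with
  | nil =>
      intro start prev ranges
      simp [rtsALoop, rtsS, rtsE, rtsFmt, rtsAFlush]
  | cons cur rest ih =>
      intro start prev ranges
      simp only [rtsALoop, rtsS, rtsE]
      by_cases h : cur = prev + 1
      · simp only [ih, h, bne_self_eq_false, Bool.false_eq_true, if_false]
        simp
      · have hb : (cur != prev + 1) = true := by simp [h]
        simp only [if_neg h, ih, hb, if_true, List.zip_cons_cons, List.map_cons]
        simp [rtsFmt, rtsAFlush, List.append_assoc]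

-- ===== VERDICT (by name: the statement is the Claim_ definition above) =====
theorem ranges_to_str_py_spec : Claim_equal_ranges_to_str_py := by
  intro vals _
  unfold Spec_ranges_to_str_py ranges_to_str_py ranges_to_str_py_alt rtsStarts rtsEnds
  cases h : PySem.List.sorted (PySem.Set.ofList vals) (fun x => x) false with
  | nil => simp [PySem.Str.join]
  | cons a rest =>
      simp only [List.singleton_append, List.drop_succ_cons, List.drop_zero,
        rtsEnds_zip, rtsALoop_eq]
      rw [rtsStarts_zip]
      simp [rtsS]
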